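-- pv_equiv track=rewrite | github.com/xshirl/ctci | chapter8/permutations.py | partial_permutations2
-- ===== SOURCE A (Python) =====
-- def partial_permutations2(partial, letters):
--     if len(letters) == 0:
--         return [partial]
--     permutations = []
--     previous_letter = None
--     for i, letter in enumerate(letters):
--         if letter == previous_letter:
--             continue
--         next_partial = partial + letter
--         next_letters = letters[:i] + letters[(i+1):]
--         permutations += partial_permutations2(next_partial, next_letters)
--         previous_letter = letter
--     return permutations
-- ===== SOURCE B (Python) =====
-- def partial_permutations2(partial, letters):
--     results = []
--     stack = [(partial, letters)]
--     while stack: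
--         part, rem = stack.pop()
--         if len(rem) == 0:
--             results.append(part)
--             continue
--         children = []
--         previous_letter = None
--         for i, letter in enumerate(rem):
--             if letter == previous_letter:
--                 continue
--             children.append((part + letter, rem[:i] + rem[i+1:]))
--             previous_letter = letter
--         stack.extend(reversed(children))
--     return results
-- ===== Notes on version B (the rewrite author's own statement) =====
-- stated objective: alternative
-- what changed: Replaces A's recursion with an iterative explicit LIFO worklist of (partial, letters) entries, pushing each node's children in reverse so popping reproduces A's pre-order output.
import Mathlib
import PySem

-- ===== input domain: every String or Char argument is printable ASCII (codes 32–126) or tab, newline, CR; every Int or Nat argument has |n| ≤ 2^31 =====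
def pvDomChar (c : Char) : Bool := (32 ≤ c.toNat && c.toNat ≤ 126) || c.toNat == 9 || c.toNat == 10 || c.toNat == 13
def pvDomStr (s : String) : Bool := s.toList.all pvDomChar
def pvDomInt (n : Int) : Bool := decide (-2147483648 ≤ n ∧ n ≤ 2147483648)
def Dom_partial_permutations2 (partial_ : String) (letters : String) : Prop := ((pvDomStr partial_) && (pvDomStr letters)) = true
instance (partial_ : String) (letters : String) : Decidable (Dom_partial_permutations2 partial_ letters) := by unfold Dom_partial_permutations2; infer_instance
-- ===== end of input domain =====

-- B replaces A's recursion by an iterative explicit LIFO worklist; same output, same cost (objective: alternative).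

-- ===== PORT A =====
-- Strings are handled as their character lists; the slice letters[:i] + letters[i+1:]
-- is represented by carrying the already-processed prefix `pre` and remaining suffix `suf`
-- of the for-loop (so pre ++ rest is exactly letters[:i] + letters[i+1:]); this is exact.
mutual
-- body of partial_permutations2
def ppA (p : List Char) (ls : List Char) : List String :=
  match ls with
  | [] => [String.ofList p]            -- if len(letters) == 0: return [partial]
  | c :: cs => goA p [] (c :: cs) none []   -- run the for-loop with permutations = [], previous_letter = None
termination_by (ls.length, 1, 0)
decreasing_by simp_wf; exact Prod.Lex.right _ (Prod.Lex.left _ _ (by omega))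

-- the for-loop of A: acc = permutations, prev = previous_letter
def goA (p : List Char) (pre suf : List Char) (prev : Option Char) (acc : List String) : List String :=
  match suf with
  | [] => acc
  | c :: rest =>
    if some c = prev then goA p (pre ++ [c]) rest prev acc   -- continue
    else goA p (pre ++ [c]) rest (some c) (acc ++ ppA (p ++ [c]) (pre ++ rest))
termination_by (pre.length + suf.length, 0, suf.length)
decreasing_by
  all_goals simp_wf
  · have h : pre.length + 1 + rest.length = pre.length + (rest.length + 1) := by omega
    rw [h]; exact Prod.Lex.right _ (Prod.Lex.right _ (by omega))
  · exact Prod.Lex.left _ _ (by omega)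
  · have h : pre.length + 1 + rest.length = pre.length + (rest.length + 1) := by omega
    rw [h]; exact Prod.Lex.right _ (Prod.Lex.right _ (by omega))
end

def partial_permutations2 (partial_ : String) (letters : String) : List String :=
  ppA partial_.toList letters.toList

-- ===== PORT B =====
-- the inner child-collecting for-loop of B (same prefix/suffix representation of the slice)
def childGo (p : List Char) (pre suf : List Char) (prev : Option Char)
    (acc : List (List Char × List Char)) : List (List Char × List Char) :=
  match suf with
  | [] => acc
  | c :: rest =>
    if some c = prev then childGo p (pre ++ [c]) rest prev acc
    else childGo p (pre ++ [c]) rest (some c) (acc ++ [(p ++ [c], pre ++ rest)])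

-- termination measure of the worklist loop: Σ (|letters|+1)! over the stack
def msrB (st : List (List Char × List Char)) : Nat :=
  (st.map (fun e => Nat.factorial (e.2.length + 1))).sum

theorem childGo_len (p : List Char) (suf : List Char) : ∀ pre prev acc,
    ∀ e ∈ childGo p pre suf prev acc, e ∈ acc ∨ e.2.length + 1 = pre.length + suf.length := by
  induction suf with
  | nil => intro pre prev acc e he; exact Or.inl he
  | cons c rest ih =>
    intro pre prev acc e he
    simp only [childGo] at he
    split at he
    · rcases ih _ _ _ _ he with h | h
      · exact Or.inl h
      · right; simp only [List.length_append, List.length_cons, List.length_nil] at h ⊢; omega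
    · rcases ih _ _ _ _ he with h | h
      · simp only [List.mem_append, List.mem_singleton] at h
        rcases h with h | h
        · exact Or.inl h
        · right; subst h
          simp only [List.length_append, List.length_cons]; omega
      · right; simp only [List.length_append, List.length_cons, List.length_nil] at h ⊢; omega

theorem childGo_count (p : List Char) (suf : List Char) : ∀ pre prev acc,
    (childGo p pre suf prev acc).length ≤ acc.length + suf.length := by
  induction suf with
  | nil => intro pre prev acc; simp [childGo]
  | cons c rest ih =>
    intro pre prev acc
    simp only [childGo]
    split
    · have := ih (pre ++ [c]) prev acc; simp at this ⊢; omega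
    · have := ih (pre ++ [c]) (some c) (acc ++ [(p ++ [c], pre ++ rest)]); simp at this ⊢; omega

theorem msrB_const {st : List (List Char × List Char)} {k : Nat}
    (h : ∀ e ∈ st, e.2.length + 1 = k) : msrB st = st.length * Nat.factorial k := by
  induction st with
  | nil => simp [msrB]
  | cons e t ih =>
    have he := h e (by simp)
    have ht := ih (fun x hx => h x (by simp [hx]))
    simp only [msrB, List.map_cons, List.sum_cons] at *
    rw [he, ht]; simp [List.length_cons]; ring

theorem msrB_children (p : List Char) (c : Char) (rest : List Char) :
    msrB (childGo p [] (c :: rest) none []) < Nat.factorial ((c :: rest).length + 1) := by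
  set st := childGo p [] (c :: rest) none [] with hst
  have hlen : ∀ e ∈ st, e.2.length + 1 = (c :: rest).length := by
    intro e he
    rcases childGo_len p (c :: rest) [] none [] e he with h | h
    · simp at h
    · simpa using h
  have hcnt : st.length ≤ (c :: rest).length := by
    have := childGo_count p (c :: rest) [] none []; simpa using this
  rw [msrB_const hlen]
  set n := (c :: rest).length with hn
  have hfac := Nat.factorial_pos n
  have hstep : Nat.factorial (n + 1) = (n + 1) * Nat.factorial n := Nat.factorial_succ n
  nlinarith

theorem msrB_append (a b : List (List Char × List Char)) : msrB (a ++ b) = msrB a + msrB b := by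
  simp [msrB]

-- the while-loop of B: pop an entry; empty letters → emit the partial; otherwise
-- collect the children and push them (head of the list = top of the stack, which is
-- exactly Python's stack.extend(reversed(children)) with pop() from the end)
def loopB (st : List (List Char × List Char)) (acc : List String) : List String :=
  match st with
  | [] => acc
  | (p, ls) :: rest =>
    match ls with
    | [] => loopB rest (acc ++ [String.ofList p])
    | c :: cs => loopB (childGo p [] (c :: cs) none [] ++ rest) acc
termination_by msrB st
decreasing_by
  · simp only [msrB, List.map_cons, List.sum_cons]
    have := Nat.factorial_pos (([] : List Char).length + 1); omega
  · rw [msrB_append]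
    have h := msrB_children p c cs
    simp only [msrB, List.map_cons, List.sum_cons] at *
    omega

def partial_permutations2_alt (partial_ : String) (letters : String) : List String :=
  loopB [(partial_.toList, letters.toList)] []

-- ===== PRECONDITION & SPEC =====
def Spec_partial_permutations2 (partial_ : String) (letters : String) (out : List String) : Prop := out = partial_permutations2_alt partial_ letters
instance (partial_ : String) (letters : String) (out : List String) : Decidable (Spec_partial_permutations2 partial_ letters out) := by unfold Spec_partial_permutations2; infer_instance

-- ===== CLAIM (what is proved, stated in full; the proofs are below) =====
def Claim_equal_partial_permutations2 : Prop := ∀ (partial_ : String) (letters : String), Dom_partial_permutations2 partial_ letters → Spec_partial_permutations2 partial_ letters (partial_permutations2 partial_ letters)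

-- ===== LEMMAS AND PROOFS =====

theorem ppA_nil (p : List Char) : ppA p [] = [String.ofList p] := by
  unfold ppA; rfl

theorem ppA_cons (p : List Char) (c : Char) (rest : List Char) :
    ppA p (c :: rest) = goA p [] (c :: rest) none [] := by
  unfold ppA; rfl

-- accumulator lemma for childGo
theorem childGo_acc (p : List Char) (suf : List Char) : ∀ pre prev acc,
    childGo p pre suf prev acc = acc ++ childGo p pre suf prev [] := by
  induction suf with
  | nil => intro pre prev acc; simp [childGo]
  | cons c rest ih =>
    intro pre prev acc
    simp only [childGo]
    split
    · exact ih _ _ _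
    · rw [ih _ _ (acc ++ _), ih _ _ ([] ++ _)]; simp

-- A's for-loop equals flat-mapping A over B's child list
theorem goA_eq_childGo (p : List Char) (suf : List Char) : ∀ pre prev acc,
    goA p pre suf prev acc
      = acc ++ (childGo p pre suf prev []).flatMap (fun e => ppA e.1 e.2) := by
  induction suf with
  | nil => intro pre prev acc; unfold goA; simp [childGo]
  | cons c rest ih =>
    intro pre prev acc
    unfold goA
    simp only [childGo]
    split
    · exact ih _ _ _
    · rw [ih]
      conv_rhs => rw [childGo_acc]
      simp

-- the worklist loop computes acc ++ flatMap of A over the stack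
theorem loopB_eq (st : List (List Char × List Char)) (acc : List String) :
    loopB st acc = acc ++ st.flatMap (fun e => ppA e.1 e.2) := by
  induction st, acc using loopB.induct with
  | case1 acc => simp [loopB]
  | case2 acc p rest ih =>
    rw [loopB, ih]
    simp [ppA_nil]
  | case3 acc p rest c cs ih =>
    rw [loopB, ih]
    have hA : ppA p (c :: cs) = (childGo p [] (c :: cs) none []).flatMap (fun e => ppA e.1 e.2) := by
      rw [ppA_cons, goA_eq_childGo]; simp
    simp [hA]

-- ===== VERDICT (by name: the statement is the Claim_ definition above) =====
theorem partial_permutations2_spec : Claim_equal_partial_permutations2 := by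
  intro partial_ letters _
  unfold Spec_partial_permutations2 partial_permutations2 partial_permutations2_alt
  rw [loopB_eq]
  simp
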